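-- pv_equiv track=rewrite | github.com/alexandrepoulin/ProjectEulerInPython | problems/problem 516.py | isHamPrime
-- ===== SOURCE A (Python) =====
-- def isHamPrime(x):
--     val=x
--     while val%2 == 0:
--         val = val//2
--     while val%3 == 0:
--         val = val//3
--     while val%5 == 0:
--         val = val//5
--     return val == 1
-- ===== SOURCE B (Python) =====
-- # x is 5-smooth iff x > 0 and x divides 2^31 * 3^31 * 5^31 = 30**31
-- # (valid because inputs are bounded by 2^31, so each prime exponent of a
-- # 5-smooth x is at most 31).  O(1): one big-int modulo instead of division loops.
-- _M = 30 ** 31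
--
-- def isHamPrime(x):
--     return x > 0 and _M % x == 0
-- ===== Notes on version B (the rewrite author's own statement) =====
-- stated objective: alternative
-- what changed: Replaces the three sequential divide-out-a-prime loops by a single constant divisibility test: x is 5-smooth on the bounded input domain iff x > 0 and x divides 30**31, so B does one modulo operation and no loop. Pre_ excludes x = 0, on which A loops forever (0//2 == 0).
import Mathlib
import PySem

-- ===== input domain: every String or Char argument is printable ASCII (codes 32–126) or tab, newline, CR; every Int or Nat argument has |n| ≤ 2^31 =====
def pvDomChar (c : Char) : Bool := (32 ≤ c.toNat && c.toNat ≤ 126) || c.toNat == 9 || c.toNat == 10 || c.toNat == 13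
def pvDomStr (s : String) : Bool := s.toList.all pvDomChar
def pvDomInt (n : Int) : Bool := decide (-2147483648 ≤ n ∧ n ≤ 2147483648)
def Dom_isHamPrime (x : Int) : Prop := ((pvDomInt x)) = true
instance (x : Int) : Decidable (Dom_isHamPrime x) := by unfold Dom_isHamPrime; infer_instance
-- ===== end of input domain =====

-- B replaces A's three divide-out-a-prime loops by one constant divisibility test
-- (x > 0 and x ∣ 30^31), exact on the bounded input domain; Pre_ excludes x = 0, where A loops forever.

-- ===== PORT A =====
-- 'while val % p == 0: val = val // p', run with fuel = |val| (sufficient for val ≠ 0: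
-- each iteration at least halves |val|; for val = 0 the Python loop never terminates, excluded by Pre_)
def pyStrip (p : Int) : Nat → Int → Int
  | 0, v => v
  | Nat.succ n, v =>
    if PySem.Int.mod v p == 0 then pyStrip p n (PySem.Int.floordiv v p) else v

def isHamPrime (x : Int) : Bool :=
  let v1 := pyStrip 2 x.natAbs x
  let v2 := pyStrip 3 v1.natAbs v1
  let v3 := pyStrip 5 v2.natAbs v2
  decide (v3 = 1)

-- ===== PORT B =====
def isHamPrime_alt (x : Int) : Bool :=
  decide (0 < x) && decide (PySem.Int.mod ((30 : Int) ^ 31) x = 0)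

-- ===== PRECONDITION & SPEC =====
-- Pre_ excludes only x = 0, on which Python A never returns (0 // 2 == 0 keeps the first loop spinning).
def Pre_isHamPrime (x : Int) : Prop := x ≠ 0
instance (x : Int) : Decidable (Pre_isHamPrime x) := by unfold Pre_isHamPrime; infer_instance
def pvWitness_isHamPrime : Int := (7)

def Spec_isHamPrime (x : Int) (out : Bool) : Prop := out = isHamPrime_alt x
instance (x : Int) (out : Bool) : Decidable (Spec_isHamPrime x out) := by unfold Spec_isHamPrime; infer_instance

-- ===== CLAIM (what is proved, stated in full; the proofs are below) =====
def Claim_equal_isHamPrime : Prop := ∀ (x : Int), Dom_isHamPrime x → Pre_isHamPrime x → Spec_isHamPrime x (isHamPrime x)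

-- ===== LEMMAS AND PROOFS =====

/-- The fueled strip loop: for `v ≠ 0` and enough fuel, the result `r` satisfies
`v = p ^ k * r` for some `k`, and `p` does not divide `r`. -/
lemma pyStrip_spec (p : Int) (hp : 2 ≤ p) :
    ∀ (fuel : Nat) (v : Int), v ≠ 0 → v.natAbs ≤ fuel →
      ∃ k : Nat, v = p ^ k * pyStrip p fuel v ∧ ¬ (p ∣ pyStrip p fuel v) := by
  intro fuel
  induction fuel with
  | zero =>
    intro v hv hf
    exfalso
    have : v.natAbs = 0 := Nat.le_zero.mp hf
    exact hv (Int.natAbs_eq_zero.mp this)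
  | succ n ih =>
    intro v hv hf
    by_cases hdvd : p ∣ v
    · have hmod : PySem.Int.mod v p == 0 := by
        simpa using (PySem.Int.mod_eq_zero_iff_dvd v p).mpr hdvd
      have hppos : (0 : Int) < p := by omega
      have hfd : PySem.Int.floordiv v p = v / p :=
        PySem.Int.floordiv_eq_ediv_of_pos hppos
      have hvp : v = p * (v / p) := (Int.mul_ediv_cancel' hdvd).symm
      have hv' : v / p ≠ 0 := by
        intro h0
        rw [h0, mul_zero] at hvp
        exact hv hvp
      have hnat : v.natAbs = p.natAbs * (v / p).natAbs := by
        calc v.natAbs = (p * (v / p)).natAbs := by rw [← hvp]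
          _ = p.natAbs * (v / p).natAbs := Int.natAbs_mul p (v / p)
      have hf' : (v / p).natAbs ≤ n := by
        have h2 : 2 ≤ p.natAbs := by omega
        have h1 : 1 ≤ (v / p).natAbs := Nat.one_le_iff_ne_zero.mpr (Int.natAbs_ne_zero.mpr hv')
        nlinarith [hf, hnat]
      obtain ⟨k, hk, hnd⟩ := ih (v / p) hv' hf'
      refine ⟨k + 1, ?_, ?_⟩
      · simp only [pyStrip, hmod, if_pos, hfd]
        rw [pow_succ]
        calc v = p * (v / p) := hvp
          _ = p * (p ^ k * pyStrip p n (v / p)) := by rw [← hk]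
          _ = p ^ k * p * pyStrip p n (v / p) := by ring
      · simp only [pyStrip, hmod, if_pos, hfd]
        exact hnd
    · have hmod : ¬ (PySem.Int.mod v p == 0) := by
        simp only [beq_iff_eq]
        intro h
        exact hdvd ((PySem.Int.mod_eq_zero_iff_dvd v p).mp h)
      refine ⟨0, ?_, ?_⟩
      · simp [pyStrip, hmod]
      · simp only [pyStrip, hmod, if_neg, Bool.false_eq_true, not_false_eq_true]
        simpa using hdvd

/-- exponent bound: `p ^ k ∣ x`, `0 < x ≤ 2^31`, `2 ≤ p` forces `k ≤ 31`. -/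
lemma pow_exp_le (p : Int) (hp : 2 ≤ p) (k : Nat) (x : Int)
    (hd : p ^ k ∣ x) (hx : 0 < x) (hb : x ≤ 2147483648) : k ≤ 31 := by
  by_contra h
  have h32 : 32 ≤ k := by omega
  have h1 : (2 : Int) ^ 32 ≤ p ^ 32 :=
    pow_le_pow_left₀ (by norm_num) hp 32
  have h2 : (p : Int) ^ 32 ≤ p ^ k :=
    pow_le_pow_right₀ (by omega) h32
  have h3 : p ^ k ≤ x := Int.le_of_dvd hx hd
  have : (2 : Int) ^ 32 ≤ 2147483648 := by
    calc (2:Int)^32 ≤ p ^ k := le_trans h1 h2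
      _ ≤ x := h3
      _ ≤ 2147483648 := hb
  norm_num at this

/-- a positive integer with no factor 2, 3 or 5 dividing `30 ^ 31` is `1`. -/
lemma coprime_dvd_eq_one (r : Int) (hr : 0 < r)
    (h2 : ¬ (2 ∣ r)) (h3 : ¬ (3 ∣ r)) (h5 : ¬ (5 ∣ r))
    (hd : r ∣ (30 : Int) ^ 31) : r = 1 := by
  set n : Nat := r.natAbs with hn
  have hnd : n ∣ (30 : Nat) ^ 31 := by
    have := Int.natAbs_dvd_natAbs.mpr hd
    simpa using this
  have hn2 : ¬ (2 ∣ n) := fun h =>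
    h2 (Int.natAbs_dvd_natAbs.mp (show (2:Int).natAbs ∣ r.natAbs by simpa [hn] using h))
  have hn3 : ¬ (3 ∣ n) := fun h =>
    h3 (Int.natAbs_dvd_natAbs.mp (show (3:Int).natAbs ∣ r.natAbs by simpa [hn] using h))
  have hn5 : ¬ (5 ∣ n) := fun h =>
    h5 (Int.natAbs_dvd_natAbs.mp (show (5:Int).natAbs ∣ r.natAbs by simpa [hn] using h))
  have c2 : Nat.Coprime n 2 := ((Nat.prime_two.coprime_iff_not_dvd).mpr hn2).symm
  have c3 : Nat.Coprime n 3 := ((Nat.prime_three.coprime_iff_not_dvd).mpr hn3).symm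
  have c5 : Nat.Coprime n 5 := (((by norm_num : Nat.Prime 5).coprime_iff_not_dvd).mpr hn5).symm
  have c30 : Nat.Coprime n 30 := by
    have : (30 : Nat) = 2 * (3 * 5) := by norm_num
    rw [this]
    exact Nat.Coprime.mul_right c2 (Nat.Coprime.mul_right c3 c5)
  have cpow : Nat.Coprime n (30 ^ 31) := c30.pow_right 31
  have hn1 : n = 1 := Nat.Coprime.eq_one_of_dvd cpow hnd
  have := Int.natAbs_eq r
  omega

-- ===== VERDICT (by name: the statement is the Claim_ definition above) =====
theorem isHamPrime_spec : Claim_equal_isHamPrime := by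
  intro x hdom hpre
  have hb : -2147483648 ≤ x ∧ x ≤ 2147483648 := by
    simpa [Dom_isHamPrime, pvDomInt] using hdom
  have hpre' : x ≠ 0 := hpre
  obtain ⟨k2, h2eq, h2nd⟩ := pyStrip_spec 2 (le_refl 2) x.natAbs x hpre' (le_refl _)
  set v1 := pyStrip 2 x.natAbs x with hv1def
  have hv1ne : v1 ≠ 0 := by intro h; rw [h, mul_zero] at h2eq; exact hpre' h2eq
  obtain ⟨k3, h3eq, h3nd⟩ := pyStrip_spec 3 (by norm_num) v1.natAbs v1 hv1ne (le_refl _)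
  set v2 := pyStrip 3 v1.natAbs v1 with hv2def
  have hv2ne : v2 ≠ 0 := by intro h; rw [h, mul_zero] at h3eq; exact hv1ne h3eq
  obtain ⟨k5, h5eq, h5nd⟩ := pyStrip_spec 5 (by norm_num) v2.natAbs v2 hv2ne (le_refl _)
  set v3 := pyStrip 5 v2.natAbs v2 with hv3def
  have d32 : v3 ∣ v2 := Dvd.intro_left (5 ^ k5) h5eq.symm
  have d21 : v2 ∣ v1 := Dvd.intro_left (3 ^ k3) h3eq.symm
  have d1x : v1 ∣ x := Dvd.intro_left (2 ^ k2) h2eq.symm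
  have hd3x : v3 ∣ x := dvd_trans (dvd_trans d32 d21) d1x
  have h2nd3 : ¬ ((2 : Int) ∣ v3) := fun h => h2nd (dvd_trans h (dvd_trans d32 d21))
  have h3nd3 : ¬ ((3 : Int) ∣ v3) := fun h => h3nd (dvd_trans h d32)
  have hxeq : x = (2 ^ k2 * 3 ^ k3 * 5 ^ k5) * v3 := by rw [h2eq, h3eq, h5eq]; ring
  have hLHS : isHamPrime x = decide (v3 = 1) := rfl
  have hmod : (PySem.Int.mod ((30 : Int) ^ 31) x = 0) ↔ x ∣ (30 : Int) ^ 31 :=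
    PySem.Int.mod_eq_zero_iff_dvd _ _
  unfold Spec_isHamPrime isHamPrime_alt
  rw [hLHS]
  by_cases hv3 : v3 = 1
  · have hxpos : 0 < x := by
      rw [hxeq, hv3, mul_one]; positivity
    have hdvd : x ∣ (30 : Int) ^ 31 := by
      have hxe : x = 2 ^ k2 * 3 ^ k3 * 5 ^ k5 := by rw [hxeq, hv3, mul_one]
      have hk2 : k2 ≤ 31 :=
        pow_exp_le 2 (le_refl 2) k2 x ⟨3 ^ k3 * 5 ^ k5, by rw [hxe]; ring⟩ hxpos hb.2
      have hk3 : k3 ≤ 31 :=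
        pow_exp_le 3 (by norm_num) k3 x ⟨2 ^ k2 * 5 ^ k5, by rw [hxe]; ring⟩ hxpos hb.2
      have hk5 : k5 ≤ 31 :=
        pow_exp_le 5 (by norm_num) k5 x ⟨2 ^ k2 * 3 ^ k3, by rw [hxe]; ring⟩ hxpos hb.2
      have h30 : (30 : Int) ^ 31 = 2 ^ 31 * 3 ^ 31 * 5 ^ 31 := by
        rw [show (30 : Int) = 2 * 3 * 5 by norm_num, mul_pow, mul_pow]
      rw [hxe, h30]
      exact mul_dvd_mul (mul_dvd_mul (pow_dvd_pow 2 hk2) (pow_dvd_pow 3 hk3))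
        (pow_dvd_pow 5 hk5)
    have e1 : decide (v3 = 1) = true := by simp [hv3]
    have e2 : decide (0 < x) = true := by simp [hxpos]
    have e3 : decide (PySem.Int.mod ((30 : Int) ^ 31) x = 0) = true := by
      simp only [decide_eq_true_eq]
      exact hmod.mpr hdvd
    rw [e1, e2, e3]
    rfl
  · have e1 : decide (v3 = 1) = false := by simp [hv3]
    by_cases hxpos : 0 < x
    · by_cases hdvd : x ∣ (30 : Int) ^ 31
      · exfalso
        apply hv3
        have hc : (0 : Int) < 2 ^ k2 * 3 ^ k3 * 5 ^ k5 := by positivity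
        have hv3pos : 0 < v3 := by
          by_contra hle
          have hle' : v3 ≤ 0 := by omega
          nlinarith [hxeq, hxpos, hc]
        exact coprime_dvd_eq_one v3 hv3pos h2nd3 h3nd3 h5nd (dvd_trans hd3x hdvd)
      · have e3 : decide (PySem.Int.mod ((30 : Int) ^ 31) x = 0) = false := by
          simp only [decide_eq_false_iff_not]
          exact fun h => hdvd (hmod.mp h)
        rw [e1, e3]
        simp
    · have e2 : decide (0 < x) = false := by
        simp only [decide_eq_false_iff_not]
        exact hxpos
      rw [e1, e2]
      simp
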